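-- pv_equiv track=rewrite | github.com/parallelno/Vector06c | Vector06c_Dev/_Projects/GameNoname/temp/tests/smallDict.py | FindPopularTriads
-- ===== SOURCE A (Python) =====
-- def TriadCount(triad, data):
-- 	count = 0
-- 	i = 2
-- 	p1, p2, p3 = triad
-- 	while i < len(data):
-- 		pp1 = data[i-2]
-- 		pp2 = data[i-1]
-- 		pp3 = data[i]
--
-- 		if p1 == pp1 and p2 == pp2 and p3 == pp3:
-- 			count += 1
-- 			i += 3
-- 		else:
-- 			i += 1
-- 	return count
--
-- def FindPopularTriads(data):
-- 	triads = {}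
-- 	i = 2
-- 	while i< len(data):
-- 		p1 = data[i-2]
-- 		p2 = data[i-1]
-- 		p3 = data[i]
-- 		triad = (p1, p2, p3)
-- 		if triad not in triads:
-- 			count = TriadCount(triad, data)
-- 			if count > 0:
-- 				triads[triad] = count
-- 		i += 1
--
-- 	pairsSorted = sorted(triads.items(), key=lambda kv: kv[1], reverse = True)
-- 	return pairsSorted
-- ===== SOURCE B (Python) =====
-- def FindPopularTriads(data):
-- 	# One pass collects each triad's occurrence positions (first-occurrence key order),
-- 	# then a greedy gap-3 scan over each position list gives the non-overlapping count.
-- 	pos = {}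
-- 	for s in range(len(data) - 2):
-- 		t = (data[s], data[s + 1], data[s + 2])
-- 		if t in pos:
-- 			pos[t].append(s)
-- 		else:
-- 			pos[t] = [s]
-- 	result = []
-- 	for t, ps in pos.items():
-- 		count = 0
-- 		last = None
-- 		for p in ps:
-- 			if last is None or p >= last + 3:
-- 				count += 1
-- 				last = p
-- 		result.append((t, count))
-- 	result.sort(key=lambda kv: kv[1], reverse=True)
-- 	return result
-- ===== Notes on version B (the rewrite author's own statement) =====
-- stated objective: faster
-- what changed: A rescans the whole list with a greedy counting pass for every distinct triad; B makes one pass collecting each triad's occurrence positions in a dict and then runs a greedy gap-3 scan over each (short) position list, keeping the same insertion order and the same stable reverse sort by count.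
import Mathlib
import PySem

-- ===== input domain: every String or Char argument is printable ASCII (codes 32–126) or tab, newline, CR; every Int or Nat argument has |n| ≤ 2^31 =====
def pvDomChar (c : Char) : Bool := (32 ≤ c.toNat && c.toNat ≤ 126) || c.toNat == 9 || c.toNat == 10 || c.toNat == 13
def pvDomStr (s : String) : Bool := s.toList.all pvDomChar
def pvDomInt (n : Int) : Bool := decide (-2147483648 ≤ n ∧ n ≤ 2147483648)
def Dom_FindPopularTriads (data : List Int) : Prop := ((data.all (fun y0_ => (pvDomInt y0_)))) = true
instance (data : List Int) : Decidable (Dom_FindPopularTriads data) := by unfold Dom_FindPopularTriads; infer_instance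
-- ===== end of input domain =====

-- B replaces A's quadratic rescans (a full greedy recount of the data per distinct triad)
-- by one pass collecting each triad's occurrence positions, then a greedy gap-3 scan per
-- position list; objective: faster (asymptotic).

-- ===== PORT A =====
-- while loop of TriadCount; indices i-2, i-1, i are in range whenever 2 ≤ i < len data,
-- which the guard maintains, so getD is exact here
def TriadCountGo (triad : Int × Int × Int) (data : List Int) (i : Nat) (count : Int) : Int :=
  if i < data.length then
    let pp1 := data.getD (i - 2) 0
    let pp2 := data.getD (i - 1) 0
    let pp3 := data.getD i 0
    if triad.1 = pp1 ∧ triad.2.1 = pp2 ∧ triad.2.2 = pp3 then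
      TriadCountGo triad data (i + 3) (count + 1)
    else
      TriadCountGo triad data (i + 1) count
  else count
termination_by data.length - i
decreasing_by all_goals omega

def TriadCount (triad : Int × Int × Int) (data : List Int) : Int :=
  TriadCountGo triad data 2 0

-- while loop of FindPopularTriads
def FindGo (data : List Int) (d : PySem.Dict (Int × Int × Int) Int) (i : Nat) :
    PySem.Dict (Int × Int × Int) Int :=
  if i < data.length then
    let triad := (data.getD (i - 2) 0, data.getD (i - 1) 0, data.getD i 0)
    let d' :=
      if d.contains triad = false then
        let count := TriadCount triad data
        if count > 0 then d.insert triad count else d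
      else d
    FindGo data d' (i + 1)
  else d
termination_by data.length - i
decreasing_by omega

def FindPopularTriads (data : List Int) : List ((Int × Int × Int) × Int) :=
  PySem.List.sorted (FindGo data PySem.Dict.empty 2).items (fun kv => kv.2) true

-- ===== PORT B =====
-- one pass building triad -> list of occurrence positions (insertion order)
def PosGo (data : List Int) (d : PySem.Dict (Int × Int × Int) (List Nat)) (s : Nat) :
    PySem.Dict (Int × Int × Int) (List Nat) :=
  if s + 2 < data.length then
    let t := (data.getD s 0, data.getD (s + 1) 0, data.getD (s + 2) 0)
    let d' :=
      match d.get? t with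
      | some v => d.insert t (v ++ [s])
      | none => d.insert t [s]
    PosGo data d' (s + 1)
  else d
termination_by data.length - s
decreasing_by omega

-- greedy non-overlapping count over a position list (count, last) state
def GreedyCount (ps : List Nat) : Int :=
  (ps.foldl
    (fun (st : Int × Option Nat) p =>
      match st.2 with
      | none => (st.1 + 1, some p)
      | some l => if l + 3 ≤ p then (st.1 + 1, some p) else st)
    (0, none)).1

def FindPopularTriads_alt (data : List Int) : List ((Int × Int × Int) × Int) :=
  PySem.List.sorted
    ((PosGo data PySem.Dict.empty 0).items.map (fun kv => (kv.1, GreedyCount kv.2)))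
    (fun kv => kv.2) true

-- ===== PRECONDITION & SPEC =====
def Spec_FindPopularTriads (data : List Int) (out : List ((Int × Int × Int) × Int)) : Prop := out = FindPopularTriads_alt data
instance (data : List Int) (out : List ((Int × Int × Int) × Int)) : Decidable (Spec_FindPopularTriads data out) := by unfold Spec_FindPopularTriads; infer_instance

-- ===== CLAIM (what is proved, stated in full; the proofs are below) =====
def Claim_equal_FindPopularTriads : Prop := ∀ (data : List Int), Dom_FindPopularTriads data → Spec_FindPopularTriads data (FindPopularTriads data)

-- ===== LEMMAS AND PROOFS =====

-- the triad starting at position s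
def triadAt (data : List Int) (s : Nat) : Int × Int × Int :=
  (data.getD s 0, data.getD (s + 1) 0, data.getD (s + 2) 0)

-- positions ≥ s at which triad t occurs
def matchPos (data : List Int) (t : Int × Int × Int) (s : Nat) : List Nat :=
  if s + 2 < data.length then
    (if triadAt data s = t then [s] else []) ++ matchPos data t (s + 1)
  else []
termination_by data.length - s
decreasing_by omega

-- recursive form of B's greedy fold
def greedyGo (ps : List Nat) (c : Int) (last : Option Nat) : Int :=
  match ps with
  | [] => c
  | p :: rest =>
    match last with
    | none => greedyGo rest (c + 1) (some p)
    | some l => if l + 3 ≤ p then greedyGo rest (c + 1) (some p) else greedyGo rest c (some l)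

theorem greedyGo_eq_foldl (ps : List Nat) (c : Int) (last : Option Nat) :
    (ps.foldl
      (fun (st : Int × Option Nat) p =>
        match st.2 with
        | none => (st.1 + 1, some p)
        | some l => if l + 3 ≤ p then (st.1 + 1, some p) else st)
      (c, last)).1 = greedyGo ps c last := by
  induction ps generalizing c last with
  | nil => rfl
  | cons p rest ih =>
    cases last with
    | none => simpa [greedyGo] using ih (c + 1) (some p)
    | some l =>
      by_cases h : l + 3 ≤ p
      · simpa [greedyGo, h] using ih (c + 1) (some p)
      · simpa [greedyGo, h] using ih c (some l)

theorem GreedyCount_eq (ps : List Nat) : GreedyCount ps = greedyGo ps 0 none := by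
  simpa [GreedyCount] using greedyGo_eq_foldl ps 0 none

theorem matchPos_lb (data : List Int) (t : Int × Int × Int) (s : Nat) :
    ∀ p ∈ matchPos data t s, s ≤ p := by
  unfold matchPos
  split
  · intro p hp
    rcases List.mem_append.1 hp with h | h
    · split at h
      · simp only [List.mem_singleton] at h; omega
      · simp at h
    · have := matchPos_lb data t (s + 1) p h; omega
  · simp
termination_by data.length - s
decreasing_by omega

theorem greedy_some_eq_none (ps : List Nat) (l : Nat) (c : Int)
    (h : ∀ p ∈ ps, l + 3 ≤ p) : greedyGo ps c (some l) = greedyGo ps c none := by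
  cases ps with
  | nil => rfl
  | cons p rest => simp [greedyGo, h p (List.mem_cons_self ..)]

theorem greedy_skip_matchPos (data : List Int) (t : Int × Int × Int) (l u : Nat)
    (hu : u < l + 3) (c : Int) :
    greedyGo (matchPos data t u) c (some l) = greedyGo (matchPos data t (u + 1)) c (some l) := by
  rw [matchPos]
  split
  · split
    · have : ¬ (l + 3 ≤ u) := by omega
      simp [greedyGo, this]
    · simp
  · rw [matchPos]
    have : ¬ (u + 1 + 2 < data.length) := by omega
    simp [this]

theorem countGo_eq (t : Int × Int × Int) (data : List Int) (s : Nat) (c : Int) :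
    TriadCountGo t data (s + 2) c = greedyGo (matchPos data t s) c none := by
  rw [TriadCountGo, matchPos]
  by_cases hg : s + 2 < data.length
  · simp only [hg, if_pos]
    have h0 : s + 2 - 2 = s := by omega
    have h1 : s + 2 - 1 = s + 1 := by omega
    rw [h0, h1]
    by_cases hm : triadAt data s = t
    · have hm' : t.1 = data.getD s 0 ∧ t.2.1 = data.getD (s + 1) 0 ∧ t.2.2 = data.getD (s + 2) 0 := by
        rcases t with ⟨a, b, c'⟩
        simp only [triadAt, Prod.ext_iff] at hm
        exact ⟨hm.1.symm, hm.2.1.symm, hm.2.2.symm⟩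
      rw [if_pos hm', if_pos hm]
      have e1 : s + 2 + 3 = s + 3 + 2 := by omega
      rw [e1, countGo_eq t data (s + 3) (c + 1), List.singleton_append]
      have key : greedyGo (matchPos data t (s + 1)) (c + 1) (some s)
          = greedyGo (matchPos data t (s + 3)) (c + 1) none := by
        have a1 := greedy_skip_matchPos data t s (s + 1) (by omega) (c + 1)
        have a2 := greedy_skip_matchPos data t s (s + 2) (by omega) (c + 1)
        have a3 := greedy_some_eq_none (matchPos data t (s + 3)) s (c + 1)
          (matchPos_lb data t (s + 3))
        exact a1.trans (a2.trans a3)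
      exact key.symm
    · have hm' : ¬ (t.1 = data.getD s 0 ∧ t.2.1 = data.getD (s + 1) 0 ∧ t.2.2 = data.getD (s + 2) 0) := by
        rcases t with ⟨a, b, c'⟩
        simp only [triadAt, Prod.ext_iff] at hm
        intro h
        exact hm ⟨h.1.symm, h.2.1.symm, h.2.2.symm⟩
      rw [if_neg hm', if_neg hm, List.nil_append]
      have e1 : s + 2 + 1 = s + 1 + 2 := by omega
      rw [e1]
      exact countGo_eq t data (s + 1) c
  · simp [hg, greedyGo]
termination_by data.length - s
decreasing_by all_goals omega

theorem matchPos_ne_nil (data : List Int) (t : Int × Int × Int) (u s : Nat)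
    (hu : u ≤ s) (hs : s + 2 < data.length) (ht : triadAt data s = t) :
    matchPos data t u ≠ [] := by
  rw [matchPos]
  have hg : u + 2 < data.length := by omega
  simp only [hg, if_pos]
  by_cases he : triadAt data u = t
  · simp [he]
  · have hne : u ≠ s := fun h => he (h ▸ ht)
    have : matchPos data t (u + 1) ≠ [] := matchPos_ne_nil data t (u + 1) s (by omega) hs ht
    simp [he, this]
termination_by s - u
decreasing_by omega

theorem greedyGo_ge (ps : List Nat) (c : Int) (l : Option Nat) : c ≤ greedyGo ps c l := by
  induction ps generalizing c l with
  | nil => simp [greedyGo]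
  | cons p rest ih =>
    cases l with
    | none => have := ih (c + 1) (some p); simp [greedyGo]; omega
    | some l' =>
      by_cases h : l' + 3 ≤ p
      · have := ih (c + 1) (some p); simp [greedyGo, h]; omega
      · have := ih c (some l'); simp [greedyGo, h]; omega

theorem greedy_pos (p : Nat) (ps : List Nat) : 0 < greedyGo (p :: ps) 0 none := by
  have := greedyGo_ge ps 1 (some p)
  simp [greedyGo]; omega

-- mapping a positions entry to A's stored entry
def gmap (data : List Int) (kv : (Int × Int × Int) × List Nat) : (Int × Int × Int) × Int :=
  (kv.1, TriadCount kv.1 data)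

theorem keys_mk_map_gmap (data : List Int) (l : List ((Int × Int × Int) × List Nat)) :
    (PySem.Dict.mk (l.map (gmap data))).keys = (PySem.Dict.mk l).keys := by
  simp [PySem.Dict.keys, gmap, Function.comp]

theorem contains_mk_map_gmap (data : List Int) (l : List ((Int × Int × Int) × List Nat))
    (k : Int × Int × Int) :
    (PySem.Dict.mk (l.map (gmap data))).contains k = (PySem.Dict.mk l).contains k := by
  rw [PySem.Dict.contains_eq_decide_mem_keys, PySem.Dict.contains_eq_decide_mem_keys,
    keys_mk_map_gmap]

theorem posGo_get? (data : List Int) (d : PySem.Dict (Int × Int × Int) (List Nat)) (s : Nat)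
    (k : Int × Int × Int) :
    (PosGo data d s).get? k =
      match d.get? k with
      | some v => some (v ++ matchPos data k s)
      | none => if matchPos data k s = [] then none else some (matchPos data k s) := by
  rw [PosGo, matchPos]
  by_cases hg : s + 2 < data.length
  · simp only [hg, if_pos, triadAt]
    set T := (data.getD s 0, data.getD (s + 1) 0, data.getD (s + 2) 0) with hT
    by_cases hk : k = T
    · rw [hk, if_pos rfl]
      cases hdk : d.get? T with
      | some v =>
        change (PosGo data (d.insert T (v ++ [s])) (s + 1)).get? T = _
        rw [posGo_get? data (d.insert T (v ++ [s])) (s + 1) T,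
          PySem.Dict.get?_insert_self]
        simp
      | none =>
        change (PosGo data (d.insert T [s]) (s + 1)).get? T = _
        rw [posGo_get? data (d.insert T [s]) (s + 1) T,
          PySem.Dict.get?_insert_self]
        simp
    · have hne : ¬ (T = k) := fun h => hk h.symm
      rw [if_neg hne, List.nil_append]
      cases hdk : d.get? T with
      | some v =>
        change (PosGo data (d.insert T (v ++ [s])) (s + 1)).get? k = _
        rw [posGo_get? data (d.insert T (v ++ [s])) (s + 1) k,
          PySem.Dict.get?_insert_of_ne _ _ hk]
      | none =>
        change (PosGo data (d.insert T [s]) (s + 1)).get? k = _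
        rw [posGo_get? data (d.insert T [s]) (s + 1) k,
          PySem.Dict.get?_insert_of_ne _ _ hk]
  · simp only [hg, if_false]
    cases d.get? k <;> simp
termination_by data.length - s
decreasing_by all_goals omega

theorem posGo_nodup (data : List Int) (d : PySem.Dict (Int × Int × Int) (List Nat)) (s : Nat)
    (h : d.keys.Nodup) : (PosGo data d s).keys.Nodup := by
  rw [PosGo]
  split
  · apply posGo_nodup
    cases d.get? (data.getD s 0, data.getD (s + 1) 0, data.getD (s + 2) 0) <;>
      exact PySem.Dict.nodup_keys_insert _ _ _ h
  · exact h
termination_by data.length - s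
decreasing_by all_goals omega

-- main invariant: A's dict is B's positions dict with each value replaced by the full count
theorem findGo_eq (data : List Int) (d : PySem.Dict (Int × Int × Int) (List Nat)) (s : Nat) :
    FindGo data (PySem.Dict.mk (d.items.map (gmap data))) (s + 2)
      = PySem.Dict.mk ((PosGo data d s).items.map (gmap data)) := by
  rw [FindGo, PosGo]
  by_cases hg : s + 2 < data.length
  · simp only [hg, if_pos]
    have h0 : s + 2 - 2 = s := by omega
    have h1 : s + 2 - 1 = s + 1 := by omega
    rw [h0, h1]
    set t := (data.getD s 0, data.getD (s + 1) 0, data.getD (s + 2) 0) with ht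
    have hcont := contains_mk_map_gmap data d.items t
    by_cases hc : d.contains t = true
    · -- existing key: A keeps its dict, B appends to the positions entry
      have hc' : (PySem.Dict.mk (d.items.map (gmap data))).contains t = true := by
        rw [hcont]; exact hc
      rw [if_neg (by rw [hc']; simp)]
      cases hdk : d.get? t with
      | none =>
        exfalso
        rw [PySem.Dict.contains_eq_isSome_get?, hdk] at hc
        simp at hc
      | some v =>
        change _ = PySem.Dict.mk ((PosGo data (d.insert t (v ++ [s])) (s + 1)).items.map (gmap data))
        have hitems : (d.insert t (v ++ [s])).items.map (gmap data) = d.items.map (gmap data) := by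
          rw [PySem.Dict.items_insert_of_contains _ _ hc, List.map_map]
          apply List.map_congr_left
          intro p _
          by_cases hp : p.1 == t
          · have hpe : p.1 = t := by simpa using hp
            simp [Function.comp, gmap, hpe]
          · simp [Function.comp, hp]
        have hrec := findGo_eq data (d.insert t (v ++ [s])) (s + 1)
        rw [hitems] at hrec
        have e1 : s + 2 + 1 = s + 1 + 2 := by omega
        rw [e1]
        exact hrec
    · -- new key: the count is positive, both dicts append a (t, _) entry
      have hcfalse : d.contains t = false := by simpa using hc
      have hc' : (PySem.Dict.mk (d.items.map (gmap data))).contains t = false := by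
        rw [hcont]; exact hcfalse
      rw [if_pos hc']
      have hmnn : matchPos data t 0 ≠ [] :=
        matchPos_ne_nil data t 0 s (by omega) hg (by rw [ht]; rfl)
      have hpos : 0 < TriadCount t data := by
        rw [TriadCount]
        have hce := countGo_eq t data 0 0
        simp only [Nat.zero_add] at hce
        rw [hce]
        cases hmp : matchPos data t 0 with
        | nil => exact absurd hmp hmnn
        | cons p rest => exact greedy_pos p rest
      rw [if_pos hpos]
      have hdk : d.get? t = none := by
        rw [PySem.Dict.contains_eq_isSome_get?] at hcfalse
        cases hq : d.get? t
        · rfl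
        · rw [hq] at hcfalse; simp at hcfalse
      rw [hdk]
      change _ = PySem.Dict.mk ((PosGo data (d.insert t [s]) (s + 1)).items.map (gmap data))
      have hins : (PySem.Dict.mk (d.items.map (gmap data))).insert t (TriadCount t data)
          = PySem.Dict.mk ((d.insert t [s]).items.map (gmap data)) := by
        apply PySem.Dict.ext
        rw [PySem.Dict.items_insert_of_not_contains _ _ hc',
          PySem.Dict.items_insert_of_not_contains _ _ hcfalse]
        simp [gmap]
      rw [hins]
      have e1 : s + 2 + 1 = s + 1 + 2 := by omega
      rw [e1]
      exact findGo_eq data (d.insert t [s]) (s + 1)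
  · simp [hg]
termination_by data.length - s
decreasing_by all_goals omega

theorem items_mk (l : List ((Int × Int × Int) × Int)) : (PySem.Dict.mk l).items = l := rfl

theorem final_items_eq (data : List Int) :
    (FindGo data PySem.Dict.empty 2).items
      = (PosGo data PySem.Dict.empty 0).items.map (fun kv => (kv.1, GreedyCount kv.2)) := by
  have h0 : (PySem.Dict.empty : PySem.Dict (Int × Int × Int) Int)
      = PySem.Dict.mk (((PySem.Dict.empty : PySem.Dict (Int × Int × Int) (List Nat))).items.map (gmap data)) := by
    rfl
  have main := findGo_eq data PySem.Dict.empty 0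
  simp only [Nat.zero_add] at main
  rw [h0, main, items_mk]
  apply List.map_congr_left
  intro kv hkv
  have hnd : (PosGo data (PySem.Dict.empty : PySem.Dict (Int × Int × Int) (List Nat)) 0).keys.Nodup :=
    posGo_nodup data _ 0 PySem.Dict.nodup_keys_empty
  have hget : (PosGo data PySem.Dict.empty 0).get? kv.1 = some kv.2 := by
    have : (kv.1, kv.2) ∈ (PosGo data PySem.Dict.empty 0).items := by simpa using hkv
    exact PySem.Dict.get?_of_mem_items _ this hnd
  rw [posGo_get? data PySem.Dict.empty 0 kv.1, PySem.Dict.get?_empty] at hget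
  have hv : kv.2 = matchPos data kv.1 0 := by
    by_cases hnil : matchPos data kv.1 0 = []
    · simp [hnil] at hget
    · simp [hnil] at hget; exact hget.symm
  have hcnt : TriadCount kv.1 data = GreedyCount kv.2 := by
    rw [TriadCount, GreedyCount_eq, hv]
    have := countGo_eq kv.1 data 0 0
    simpa using this
  simp [gmap, hcnt]

-- ===== VERDICT (by name: the statement is the Claim_ definition above) =====
theorem FindPopularTriads_spec : Claim_equal_FindPopularTriads := by
  intro data _
  unfold Spec_FindPopularTriads FindPopularTriads FindPopularTriads_alt
  rw [final_items_eq]
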